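-- pv_equiv track=rewrite | github.com/posl/comment_recommendation | script/split_gen/2_time/zh/271_D/9.py | solve
-- ===== SOURCE A (Python) =====
-- def solve(card, S):
--     # 将第i张牌的正面可见，第j张牌的背面可见，第k张牌的背面可见
--     dp = [[[False for _ in range(S+1)] for _ in range(S+1)] for _ in range(len(card)+1)]
--     dp[0][0][0] = True
--     for i in range(len(card)):
--         for j in range(S+1):
--             for k in range(S+1):
--                 if dp[i][j][k]:
--                     dp[i+1][j][k] = True
--                     if j+card[i][0] <= S:
--                         dp[i+1][j+card[i][0]][k] = True
--                     if k+card[i][1] <= S: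
--                         dp[i+1][j][k+card[i][1]] = True
--     if not dp[len(card)][S][S]:
--         return False, []
--     else:
--         ans = []
--         i = len(card)
--         j = S
--         k = S
--         while i > 0:
--             if dp[i-1][j][k]:
--                 ans.append('H')
--             elif j-card[i-1][0] >= 0 and dp[i-1][j-card[i-1][0]][k]:
--                 ans.append('T')
--                 j -= card[i-1][0]
--             else:
--                 ans.append('F')
--                 k -= card[i-1][1]
--             i -= 1
--         return True, ans[::-1]
-- ===== SOURCE B (Python) =====
-- def solve(card, S):
--     # Bitset DP: each layer is a list of (S+1) big integers; rows[j] has bit k set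
--     # iff front-sum j and back-sum k are reachable. A card's three transitions are
--     # whole-row integer OR/shift operations, removing A's inner k-loop entirely.
--     full = (1 << (S + 1)) - 1
--     rows = [1] + [0] * S
--     layers = [rows]
--     for x, y in card:
--         rows = [r | ((r << y) & full) | (rows[j - x] if x <= j else 0)
--                 for j, r in enumerate(rows)]
--         layers.append(rows)
--     if not (rows[S] >> S) & 1:
--         return False, []
--     ans = []
--     j = k = S
--     for i in range(len(card), 0, -1):
--         x, y = card[i - 1]
--         L = layers[i - 1]
--         if (L[j] >> k) & 1:
--             ans.append('H')
--         elif j >= x and (L[j - x] >> k) & 1: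
--             ans.append('T')
--             j -= x
--         else:
--             ans.append('F')
--             k -= y
--     return True, ans[::-1]
-- ===== Notes on version B (the rewrite author's own statement) =====
-- stated objective: faster
-- what changed: Replaces A's dense (n+1)x(S+1)x(S+1) boolean table filled by triple nested index loops with bitset rows: each layer is (S+1) big integers whose bit k marks a reachable back-sum, and a card's three transitions become one whole-row OR / shift-and-mask / shifted-row-OR pass, eliminating the inner k-loop; reconstruction walks the stored layers by single bit tests.
-- outside the precondition, e.g. on solve([(4, -1), (3, 1)], 3): A returns (True, ['F', 'T']), B raises ValueError
import Mathlib
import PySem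

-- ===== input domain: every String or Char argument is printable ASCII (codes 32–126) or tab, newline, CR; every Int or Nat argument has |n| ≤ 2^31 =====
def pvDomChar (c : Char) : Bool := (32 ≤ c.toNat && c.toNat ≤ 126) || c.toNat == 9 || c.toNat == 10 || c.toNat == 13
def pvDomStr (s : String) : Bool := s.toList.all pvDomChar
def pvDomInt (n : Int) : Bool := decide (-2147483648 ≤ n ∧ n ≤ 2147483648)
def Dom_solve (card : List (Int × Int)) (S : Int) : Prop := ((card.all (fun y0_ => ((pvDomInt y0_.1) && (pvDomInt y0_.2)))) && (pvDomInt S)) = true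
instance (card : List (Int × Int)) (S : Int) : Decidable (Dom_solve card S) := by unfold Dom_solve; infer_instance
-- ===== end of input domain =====

-- B replaces A's dense boolean table and triple nested loops by bitset rows (one big
-- integer of back-sum bits per front-sum), one OR/shift/mask pass per card: constant-factor
-- faster (word-parallel bit operations); return values proved equal on Pre_solve.


-- ===== PORT A =====
/-- Python in-place update `l[i] = f(l[i])`: exact for in-range indices including negative
wraparound; Python raises IndexError out of range (excluded by `Pre_solve`), here a no-op. -/
def pyModify {α : Type} (l : List α) (i : Int) (f : α → α) : List α :=
  let i' : Int := if i < 0 then i + l.length else i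
  if 0 ≤ i' ∧ i' < (l.length : Int) then l.modify i'.toNat f else l

/-- Python list read `l[i]`: exact for in-range indices (incl. negative wrap); default `d` in
place of IndexError, which is unreachable under `Pre_solve`. -/
def pyGetI {α : Type} (l : List α) (i : Int) (d : α) : α := (PySem.List.pyGet? l i).getD d

/-- read `dp[i][j][k]` -/
def get3 (dp : List (List (List Bool))) (i j k : Int) : Bool :=
  pyGetI (pyGetI (pyGetI dp i []) j []) k false

/-- write `dp[i][j][k] = True` -/
def set3 (dp : List (List (List Bool))) (i j k : Int) : List (List (List Bool)) :=
  pyModify dp i (fun r => pyModify r j (fun c => pyModify c k (fun _ => true)))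

/-- `dp = [[[False …]]]` built exactly as A's nested comprehensions do -/
def dpInit (card : List (Int × Int)) (S : Int) : List (List (List Bool)) :=
  (PySem.List.pyRange 0 ((card.length : Int) + 1) 1).map (fun _ =>
    (PySem.List.pyRange 0 (S + 1) 1).map (fun _ =>
      (PySem.List.pyRange 0 (S + 1) 1).map (fun _ => false)))

/-- body of A's innermost `for k in range(S+1)` loop -/
def bodyK (card : List (Int × Int)) (S : Int) (i j : Int)
    (dp : List (List (List Bool))) (k : Int) : List (List (List Bool)) :=
  if get3 dp i j k then
    let c := (PySem.List.pyGet? card i).getD (0, 0)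
    let dp := set3 dp (i + 1) j k
    let dp := if j + c.1 ≤ S then set3 dp (i + 1) (j + c.1) k else dp
    if k + c.2 ≤ S then set3 dp (i + 1) j (k + c.2) else dp
  else dp

def innerK (card : List (Int × Int)) (S : Int) (i j : Int)
    (dp : List (List (List Bool))) : List (List (List Bool)) :=
  (PySem.List.pyRange 0 (S + 1) 1).foldl (bodyK card S i j) dp

def innerJ (card : List (Int × Int)) (S : Int) (i : Int)
    (dp : List (List (List Bool))) : List (List (List Bool)) :=
  (PySem.List.pyRange 0 (S + 1) 1).foldl (fun dp j => innerK card S i j dp) dp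

/-- A's triple DP-filling loop -/
def dpAll (card : List (Int × Int)) (S : Int) : List (List (List Bool)) :=
  (PySem.List.pyRange 0 (card.length : Int) 1).foldl (fun dp i => innerJ card S i dp)
    (set3 (dpInit card S) 0 0 0)

/-- A's `while i > 0` reconstruction loop; fuel = Python's `i`. -/
def recA (card : List (Int × Int)) (dp : List (List (List Bool))) :
    Nat → Int → Int → List String → List String
  | 0, _, _, ans => ans
  | (i+1), j, k, ans =>
    let c := (PySem.List.pyGet? card (i : Int)).getD (0, 0)
    if get3 dp (i : Int) j k then recA card dp i j k (ans ++ ["H"])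
    else if decide (0 ≤ j - c.1) && get3 dp (i : Int) (j - c.1) k then
      recA card dp i (j - c.1) k (ans ++ ["T"])
    else recA card dp i j (k - c.2) (ans ++ ["F"])

def solve (card : List (Int × Int)) (S : Int) : Bool × List String :=
  let dp := dpAll card S
  if !(get3 dp (card.length : Int) S S) then (false, [])
  else (true, (recA card dp card.length S S []).reverse)

-- ===== PORT B =====
/-- `full = (1 << (S+1)) - 1`; rows hold nonnegative Python ints, modelled as `Nat`. -/
def bFull (S : Int) : Nat := (1 <<< (S + 1).toNat) - 1

/-- `rows = [1] + [0] * S` -/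
def bInit (S : Int) : List Nat := [1] ++ List.replicate S.toNat 0

/-- the per-card comprehension `[r | ((r << y) & full) | (rows[j-x] if x <= j else 0)
for j, r in enumerate(rows)]`; `y.toNat` is exact for `0 ≤ y` (Python raises ValueError on a
negative shift — excluded by `Pre_solve`). -/
def bStep (S x y : Int) (rows : List Nat) : List Nat :=
  (PySem.List.enumerate rows 0).map (fun jr =>
    (jr.2 ||| ((jr.2 <<< y.toNat) &&& bFull S)) |||
      (if x ≤ jr.1 then (PySem.List.pyGet? rows (jr.1 - x)).getD 0 else 0))

/-- B's forward pass: returns (layers, rows) -/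
def bAll (card : List (Int × Int)) (S : Int) : List (List Nat) × List Nat :=
  card.foldl (fun st c =>
    let nw := bStep S c.1 c.2 st.2
    (st.1 ++ [nw], nw)) ([bInit S], bInit S)

/-- truthiness of `(r >> k) & 1`; `k.toNat` is exact for `0 ≤ k` (Python raises on a
negative shift; under `Pre_solve` the walk only tests nonnegative `k`). -/
def bTest (r : Nat) (k : Int) : Bool := ((r >>> k.toNat) &&& 1) != 0

/-- B's backward reconstruction loop over the stored layers; fuel = Python's `i`. -/
def recB (card : List (Int × Int)) (layers : List (List Nat)) :
    Nat → Int → Int → List String → List String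
  | 0, _, _, ans => ans
  | (i+1), j, k, ans =>
    let c := (PySem.List.pyGet? card (i : Int)).getD (0, 0)
    let L := (PySem.List.pyGet? layers (i : Int)).getD []
    if bTest ((PySem.List.pyGet? L j).getD 0) k then recB card layers i j k (ans ++ ["H"])
    else if decide (c.1 ≤ j) && bTest ((PySem.List.pyGet? L (j - c.1)).getD 0) k then
      recB card layers i (j - c.1) k (ans ++ ["T"])
    else recB card layers i j (k - c.2) (ans ++ ["F"])

def solve_alt (card : List (Int × Int)) (S : Int) : Bool × List String :=
  let st := bAll card S
  if !(bTest ((PySem.List.pyGet? st.2 S).getD 0) S) then (false, [])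
  else (true, (recB card st.1 card.length S S []).reverse)

-- ===== PRECONDITION & SPEC =====
-- Pre_solve excludes negative S, on which the Python A raises IndexError at once, and cards
-- containing a negative value, on which A's returned values come from Python negative-index
-- wraparound into the dp table and are accidental (B's bit shifts raise ValueError there).
def Pre_solve (card : List (Int × Int)) (S : Int) : Prop :=
  0 ≤ S ∧ ∀ p ∈ card, 0 ≤ p.1 ∧ 0 ≤ p.2
instance (card : List (Int × Int)) (S : Int) : Decidable (Pre_solve card S) := by
  unfold Pre_solve; infer_instance

def pvWitness_solve : (List (Int × Int)) × Int := ([(1, 1), (2, 0)], 2)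

def Spec_solve (card : List (Int × Int)) (S : Int) (out : Bool × List String) : Prop :=
  out = solve_alt card S
instance (card : List (Int × Int)) (S : Int) (out : Bool × List String) :
    Decidable (Spec_solve card S out) := by unfold Spec_solve; infer_instance

-- ===== CLAIM (what is proved, stated in full; the proofs are below) =====
def Claim_equal_solve : Prop := ∀ (card : List (Int × Int)) (S : Int),
  Dom_solve card S → Pre_solve card S → Spec_solve card S (solve card S)

-- ===== LEMMAS AND PROOFS =====

/-- the mathematical model: `mdl card S i x y` ⟺ after the first `i` cards, front sum `x`
and back sum `y` are simultaneously reachable (both kept ≤ S at every step). -/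
def mdl (card : List (Int × Int)) (S : Int) : Nat → Int → Int → Prop
  | 0, x, y => x = 0 ∧ y = 0
  | (i+1), x, y =>
      mdl card S i x y ∨
      ((card.getD i (0, 0)).1 ≤ x ∧ x ≤ S ∧ mdl card S i (x - (card.getD i (0, 0)).1) y) ∨
      ((card.getD i (0, 0)).2 ≤ y ∧ y ≤ S ∧ mdl card S i x (y - (card.getD i (0, 0)).2))

lemma card_getD_nonneg (card : List (Int × Int)) (S : Int) (h : Pre_solve card S) (i : Nat) :
    0 ≤ (card.getD i (0, 0)).1 ∧ 0 ≤ (card.getD i (0, 0)).2 := by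
  by_cases hi : i < card.length
  · exact h.2 (card.getD i (0, 0))
      (by rw [List.getD_eq_getElem card (0, 0) hi]; exact List.getElem_mem hi)
  · rw [List.getD_eq_default card (0, 0) (by omega)]
    exact ⟨le_refl 0, le_refl 0⟩

lemma mdl_range (card : List (Int × Int)) (S : Int) (h : Pre_solve card S) :
    ∀ (i : Nat) (x y : Int), mdl card S i x y → 0 ≤ x ∧ x ≤ S ∧ 0 ≤ y ∧ y ≤ S := by
  intro i
  induction i with
  | zero =>
    intro x y hm
    obtain ⟨hx, hy⟩ := hm
    subst hx; subst hy
    exact ⟨le_refl 0, h.1, le_refl 0, h.1⟩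
  | succ i ih =>
    intro x y hm
    have hc := card_getD_nonneg card S h i
    rcases hm with hm | ⟨h1, h2, hm⟩ | ⟨h1, h2, hm⟩
    · exact ih x y hm
    · have := ih _ _ hm; omega
    · have := ih _ _ hm; omega

-- ---- reads and writes (A side) ----

lemma length_pyModify {α : Type} (l : List α) (i : Int) (f : α → α) :
    (pyModify l i f).length = l.length := by
  unfold pyModify; dsimp only; split <;> split <;>
    first
      | apply List.length_modify
      | rfl

lemma getD_pyModify {α : Type} (l : List α) (i : Int) (hi : 0 ≤ i) (f : α → α) (m : Nat) (d : α) :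
    (pyModify l i f).getD m d =
      if m = i.toNat ∧ m < l.length then f (l.getD m d) else l.getD m d := by
  unfold pyModify
  dsimp only
  rw [if_neg (by omega : ¬ i < 0)]
  by_cases hr : i.toNat < l.length
  · rw [if_pos ⟨hi, by omega⟩, List.getD_eq_getElem?_getD, List.getElem?_modify]
    by_cases hm : m = i.toNat
    · subst hm
      rw [if_pos ⟨rfl, hr⟩]
      simp [List.getElem?_eq_getElem hr]
    · have hne : ¬ (i.toNat = m) := fun h => hm h.symm
      rw [if_neg (by tauto)]
      simp [hne, List.getD_eq_getElem?_getD]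
  · rw [if_neg (by omega), if_neg (by omega)]

lemma pyGetI_eq_getD {α : Type} (l : List α) (i : Int) (hi : 0 ≤ i) (d : α) :
    pyGetI l i d = l.getD i.toNat d := by
  rw [pyGetI, PySem.List.pyGet?_of_nonneg l hi, ← List.getD_eq_getElem?_getD]

lemma pyGetI_nil {α : Type} (i : Int) (d : α) : pyGetI ([] : List α) i d = d := by
  unfold pyGetI
  cases h : PySem.List.pyGet? ([] : List α) i with
  | none => rfl
  | some a => exact absurd (PySem.List.mem_of_pyGet?_eq_some _ h) (by simp)

lemma pyGetI_mem_or {α : Type} (l : List α) (i : Int) (d : α) :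
    pyGetI l i d = d ∨ pyGetI l i d ∈ l := by
  unfold pyGetI
  cases h : PySem.List.pyGet? l i with
  | none => left; rfl
  | some a => right; exact PySem.List.mem_of_pyGet?_eq_some _ h

/-- shape of the dp table -/
def Shp (dp : List (List (List Bool))) (n Sn : Nat) : Prop :=
  dp.length = n + 1 ∧
  (∀ m : Nat, m < n + 1 → (dp.getD m []).length = Sn + 1) ∧
  (∀ m j : Nat, m < n + 1 → j < Sn + 1 → ((dp.getD m []).getD j []).length = Sn + 1)

lemma get3_eq_getD (dp : List (List (List Bool))) (i j k : Int)
    (hi : 0 ≤ i) (hj : 0 ≤ j) (hk : 0 ≤ k) :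
    get3 dp i j k = ((dp.getD i.toNat []).getD j.toNat []).getD k.toNat false := by
  rw [get3, pyGetI_eq_getD dp i hi, pyGetI_eq_getD _ j hj, pyGetI_eq_getD _ k hk]

lemma shp_set3 (dp : List (List (List Bool))) (n Sn : Nat) (i j k : Int)
    (hi : 0 ≤ i) (hj : 0 ≤ j) (_hk : 0 ≤ k) (h : Shp dp n Sn) : Shp (set3 dp i j k) n Sn := by
  obtain ⟨h1, h2, h3⟩ := h
  refine ⟨?_, ?_, ?_⟩
  · rw [set3, length_pyModify]; exact h1
  · intro m hm
    rw [set3, getD_pyModify dp i hi _ m []]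
    split_ifs with hcase
    · rw [length_pyModify]; exact h2 m hm
    · exact h2 m hm
  · intro m j' hm hj'
    rw [set3, getD_pyModify dp i hi _ m []]
    split_ifs with hcase
    · rw [getD_pyModify _ j hj _ j' []]
      split_ifs with hc2
      · rw [length_pyModify]; exact h3 m j' hm hj'
      · exact h3 m j' hm hj'
    · exact h3 m j' hm hj'

lemma get3_set3_ne (dp : List (List (List Bool))) (i j k x y z : Int)
    (hi : 0 ≤ i) (hj : 0 ≤ j) (hk : 0 ≤ k) (hx : 0 ≤ x) (hy : 0 ≤ y) (hz : 0 ≤ z)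
    (hne : ¬(x = i ∧ y = j ∧ z = k)) :
    get3 (set3 dp i j k) x y z = get3 dp x y z := by
  rw [get3_eq_getD (set3 dp i j k) x y z hx hy hz, get3_eq_getD dp x y z hx hy hz]
  rw [set3, getD_pyModify dp i hi _ x.toNat []]
  by_cases hxi : x.toNat = i.toNat ∧ x.toNat < dp.length
  · rw [if_pos hxi]
    have hxe : x = i := by omega
    subst hxe
    rw [getD_pyModify _ j hj _ y.toNat []]
    by_cases hyj : y.toNat = j.toNat ∧ y.toNat < (dp.getD x.toNat []).length
    · rw [if_pos hyj]
      have hye : y = j := by omega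
      subst hye
      rw [getD_pyModify _ k hk _ z.toNat false]
      rw [if_neg (by rintro ⟨hzz, -⟩; exact hne ⟨rfl, rfl, by omega⟩)]
    · rw [if_neg hyj]
  · rw [if_neg hxi]

lemma get3_set3_self (dp : List (List (List Bool))) (n Sn : Nat) (i j k : Int)
    (h : Shp dp n Sn) (hi : 0 ≤ i) (hi2 : i ≤ (n : Int)) (hj : 0 ≤ j) (hj2 : j ≤ (Sn : Int))
    (hk : 0 ≤ k) (hk2 : k ≤ (Sn : Int)) :
    get3 (set3 dp i j k) i j k = true := by
  obtain ⟨h1, h2, h3⟩ := h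
  rw [get3_eq_getD _ i j k hi hj hk, set3, getD_pyModify dp i hi _ i.toNat []]
  rw [if_pos ⟨rfl, by omega⟩]
  rw [getD_pyModify _ j hj _ j.toNat []]
  have hrl : (dp.getD i.toNat []).length = Sn + 1 := h2 i.toNat (by omega)
  rw [if_pos ⟨rfl, by omega⟩]
  rw [getD_pyModify _ k hk _ k.toNat false]
  have hcl : ((dp.getD i.toNat []).getD j.toNat []).length = Sn + 1 :=
    h3 i.toNat j.toNat (by omega) (by omega)
  rw [if_pos ⟨rfl, by omega⟩]

lemma get3_set3 (dp : List (List (List Bool))) (n Sn : Nat) (i j k x y z : Int)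
    (h : Shp dp n Sn) (hi : 0 ≤ i) (hi2 : i ≤ (n : Int)) (hj : 0 ≤ j) (hj2 : j ≤ (Sn : Int))
    (hk : 0 ≤ k) (hk2 : k ≤ (Sn : Int)) (hx : 0 ≤ x) (hy : 0 ≤ y) (hz : 0 ≤ z) :
    (get3 (set3 dp i j k) x y z = true ↔ (get3 dp x y z = true ∨ (x = i ∧ y = j ∧ z = k))) := by
  constructor
  · intro hset
    by_cases he : x = i ∧ y = j ∧ z = k
    · exact Or.inr he
    · left; rw [← get3_set3_ne dp i j k x y z hi hj hk hx hy hz he]; exact hset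
  · intro hor
    rcases hor with hold | ⟨rfl, rfl, rfl⟩
    · by_cases he : x = i ∧ y = j ∧ z = k
      · obtain ⟨rfl, rfl, rfl⟩ := he
        exact get3_set3_self dp n Sn x y z ⟨h.1, h.2.1, h.2.2⟩ hi hi2 hj hj2 hk hk2
      · rw [get3_set3_ne dp i j k x y z hi hj hk hx hy hz he]; exact hold
    · exact get3_set3_self dp n Sn x y z ⟨h.1, h.2.1, h.2.2⟩ hi hi2 hj hj2 hk hk2

lemma get3_oob (dp : List (List (List Bool))) (n Sn : Nat) (r x y : Int)
    (h : Shp dp n Sn) (hr : 0 ≤ r) (hx : 0 ≤ x) (hy : 0 ≤ y)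
    (hbig : (n : Int) < r ∨ (Sn : Int) < x ∨ (Sn : Int) < y) :
    get3 dp r x y = false := by
  obtain ⟨h1, h2, h3⟩ := h
  rw [get3_eq_getD dp r x y hr hx hy]
  by_cases hrn : r.toNat < n + 1
  · by_cases hxn : x.toNat < Sn + 1
    · rcases hbig with hb | hb | hb
      · exact absurd hb (by omega)
      · exact absurd hb (by omega)
      · have hcl := h3 r.toNat x.toNat hrn hxn
        rw [List.getD_eq_default _ _ (by omega)]
    · have hxl : (dp.getD r.toNat []).length ≤ x.toNat := by rw [h2 r.toNat hrn]; omega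
      rw [List.getD_eq_default _ _ hxl, List.getD_eq_default ([] : List Bool) _ (Nat.zero_le _)]
  · have hrl : dp.length ≤ r.toNat := by omega
    rw [List.getD_eq_default _ _ hrl,
      List.getD_eq_default ([] : List (List Bool)) _ (Nat.zero_le _),
      List.getD_eq_default ([] : List Bool) _ (Nat.zero_le _)]

lemma getD_map_const {β γ : Type} (l : List β) (g : γ) (m : Nat) (d : γ) :
    (l.map (fun _ => g)).getD m d = if m < l.length then g else d := by
  by_cases h : m < l.length
  · rw [if_pos h, List.getD_eq_getElem _ _ (by simpa using h), List.getElem_map]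
  · rw [if_neg h, List.getD_eq_default _ _ (by simpa using h)]

lemma shp_dpInit (card : List (Int × Int)) (S : Int) (hS : 0 ≤ S) :
    Shp (dpInit card S) card.length S.toNat := by
  have hr1 : (PySem.List.pyRange 0 ((card.length : Int) + 1) 1).length = card.length + 1 := by
    rw [PySem.List.length_pyRange_one]; omega
  have hr2 : (PySem.List.pyRange 0 (S + 1) 1).length = S.toNat + 1 := by
    rw [PySem.List.length_pyRange_one]; omega
  refine ⟨?_, ?_, ?_⟩
  · unfold dpInit
    rw [List.length_map, hr1]
  · intro m hm
    unfold dpInit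
    rw [getD_map_const, if_pos (by omega)]
    rw [List.length_map, hr2]
  · intro m j hm hj
    unfold dpInit
    rw [getD_map_const, if_pos (by omega), getD_map_const, if_pos (by omega)]
    rw [List.length_map, hr2]

lemma get3_dpInit (card : List (Int × Int)) (S : Int) (r x y : Int) :
    get3 (dpInit card S) r x y = false := by
  rw [get3]
  unfold dpInit
  rcases pyGetI_mem_or
      ((PySem.List.pyRange 0 ((card.length : Int) + 1) 1).map (fun _ =>
        (PySem.List.pyRange 0 (S + 1) 1).map (fun _ =>
          (PySem.List.pyRange 0 (S + 1) 1).map (fun _ => false)))) r [] with h1 | h1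
  · rw [h1, pyGetI_nil, pyGetI_nil]
  · obtain ⟨a, -, hae⟩ := List.mem_map.mp h1
    rw [← hae]
    rcases pyGetI_mem_or
        ((PySem.List.pyRange 0 (S + 1) 1).map (fun _ =>
          (PySem.List.pyRange 0 (S + 1) 1).map (fun _ => false))) x [] with h2 | h2
    · rw [h2, pyGetI_nil]
    · obtain ⟨a2, -, hae2⟩ := List.mem_map.mp h2
      rw [← hae2]
      rcases pyGetI_mem_or ((PySem.List.pyRange 0 (S + 1) 1).map (fun _ => false)) y false
          with h3 | h3
      · rw [h3]
      · obtain ⟨a3, -, hae3⟩ := List.mem_map.mp h3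
        rw [← hae3]

-- ---- the inner double loop (A side) ----

def Done (t u x y : Int) : Prop := x < t ∨ (x = t ∧ y < u)

/-- value of cell (x,y) of row i+1 after the sources satisfying `Done t u` were processed -/
def Val (card : List (Int × Int)) (S : Int) (dpB : List (List (List Bool))) (i : Nat)
    (t u x y : Int) : Prop :=
  (Done t u x y ∧ get3 dpB (i : Int) x y = true) ∨
  ((card.getD i (0, 0)).1 ≤ x ∧ x ≤ S ∧ Done t u (x - (card.getD i (0, 0)).1) y ∧
    get3 dpB (i : Int) (x - (card.getD i (0, 0)).1) y = true) ∨
  ((card.getD i (0, 0)).2 ≤ y ∧ y ≤ S ∧ Done t u x (y - (card.getD i (0, 0)).2) ∧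
    get3 dpB (i : Int) x (y - (card.getD i (0, 0)).2) = true)

def InvD (card : List (Int × Int)) (S : Int) (dpB : List (List (List Bool))) (i : Nat)
    (t u : Int) (dp : List (List (List Bool))) : Prop :=
  Shp dp card.length S.toNat ∧
  (∀ r x y : Int, 0 ≤ r → 0 ≤ x → 0 ≤ y → r ≠ (i : Int) + 1 → get3 dp r x y = get3 dpB r x y) ∧
  (∀ x y : Int, 0 ≤ x → 0 ≤ y → (get3 dp ((i : Int) + 1) x y = true ↔ Val card S dpB i t u x y))

lemma stepK (card : List (Int × Int)) (S : Int) (dpB dp : List (List (List Bool))) (i : Nat)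
    (t u : Int) (hpre : Pre_solve card S) (hi : i < card.length)
    (ht : 0 ≤ t) (ht2 : t ≤ S) (hu : 0 ≤ u) (hu2 : u ≤ S)
    (h : InvD card S dpB i t u dp) :
    InvD card S dpB i t (u + 1) (bodyK card S (i : Int) t dp u) := by
  have hS0 : 0 ≤ S := hpre.1
  obtain ⟨hshp, hrows, hrow⟩ := h
  obtain ⟨hca, hcb⟩ := card_getD_nonneg card S hpre i
  have hcard : (PySem.List.pyGet? card (i : Int)).getD (0, 0) = card.getD i (0, 0) := by
    rw [PySem.List.pyGet?_natCast, ← List.getD_eq_getElem?_getD]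
  have hi0 : (0 : Int) ≤ (i : Int) := by omega
  have hcond : get3 dp (i : Int) t u = get3 dpB (i : Int) t u :=
    hrows (i : Int) t u hi0 ht hu (by omega)
  simp only [bodyK, hcard, hcond]
  cases hcur : get3 dpB (i : Int) t u with
  | false =>
    rw [if_neg Bool.false_ne_true]
    refine ⟨hshp, hrows, ?_⟩
    intro x y hx hy
    rw [hrow x y hx hy]
    unfold Val Done
    constructor
    · rintro (⟨hd, hg⟩ | ⟨h1, h2, hd, hg⟩ | ⟨h1, h2, hd, hg⟩)
      · exact Or.inl ⟨by omega, hg⟩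
      · exact Or.inr (Or.inl ⟨h1, h2, by omega, hg⟩)
      · exact Or.inr (Or.inr ⟨h1, h2, by omega, hg⟩)
    · rintro (⟨hd, hg⟩ | ⟨h1, h2, hd, hg⟩ | ⟨h1, h2, hd, hg⟩)
      · refine Or.inl ⟨?_, hg⟩
        by_cases hxy : x = t ∧ y = u
        · obtain ⟨hxy1, hxy2⟩ := hxy
          rw [hxy1, hxy2, hcur] at hg
          exact absurd hg Bool.false_ne_true
        · omega
      · refine Or.inr (Or.inl ⟨h1, h2, ?_, hg⟩)
        by_cases hxy : x - (card.getD i (0, 0)).1 = t ∧ y = u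
        · obtain ⟨hxy1, hxy2⟩ := hxy
          rw [hxy1, hxy2, hcur] at hg
          exact absurd hg Bool.false_ne_true
        · omega
      · refine Or.inr (Or.inr ⟨h1, h2, ?_, hg⟩)
        by_cases hxy : x = t ∧ y - (card.getD i (0, 0)).2 = u
        · obtain ⟨hxy1, hxy2⟩ := hxy
          rw [hxy1, hxy2, hcur] at hg
          exact absurd hg Bool.false_ne_true
        · omega
  | true =>
    rw [if_pos rfl]
    have hi1 : (0 : Int) ≤ (i : Int) + 1 := by omega
    have hrow2 : (i : Int) + 1 ≤ (card.length : Int) := by exact_mod_cast hi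
    set d1 := set3 dp ((i : Int) + 1) t u with hd1
    set d2 := if t + (card.getD i (0, 0)).1 ≤ S
      then set3 d1 ((i : Int) + 1) (t + (card.getD i (0, 0)).1) u else d1 with hd2
    set d3 := if u + (card.getD i (0, 0)).2 ≤ S
      then set3 d2 ((i : Int) + 1) t (u + (card.getD i (0, 0)).2) else d2 with hd3
    have hshp1 : Shp d1 card.length S.toNat :=
      shp_set3 dp card.length S.toNat _ t u hi1 ht hu hshp
    have hshp2 : Shp d2 card.length S.toNat := by
      rw [hd2]; split_ifs with hs
      · exact shp_set3 d1 card.length S.toNat _ _ u hi1 (by omega) hu hshp1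
      · exact hshp1
    have hshp3 : Shp d3 card.length S.toNat := by
      rw [hd3]; split_ifs with hs
      · exact shp_set3 d2 card.length S.toNat _ t _ hi1 ht (by omega) hshp2
      · exact hshp2
    have hne3 : ∀ r x y : Int, 0 ≤ r → 0 ≤ x → 0 ≤ y → r ≠ (i : Int) + 1 →
        get3 d3 r x y = get3 dp r x y := by
      intro r x y h0 h1' h2' hner
      have e1 : get3 d1 r x y = get3 dp r x y := by
        rw [hd1, get3_set3_ne dp ((i : Int) + 1) t u r x y hi1 ht hu h0 h1' h2'
          (by rintro ⟨hh, -, -⟩; exact hner hh)]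
      have e2 : get3 d2 r x y = get3 dp r x y := by
        rw [hd2]; split_ifs with hs
        · rw [get3_set3_ne d1 ((i : Int) + 1) (t + (card.getD i (0, 0)).1) u r x y hi1
            (by omega) hu h0 h1' h2' (by rintro ⟨hh, -, -⟩; exact hner hh), e1]
        · exact e1
      rw [hd3]; split_ifs with hs
      · rw [get3_set3_ne d2 ((i : Int) + 1) t (u + (card.getD i (0, 0)).2) r x y hi1 ht
          (by omega) h0 h1' h2' (by rintro ⟨hh, -, -⟩; exact hner hh), e2]
      · exact e2
    have h1c : ∀ x y : Int, 0 ≤ x → 0 ≤ y →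
        (get3 d1 ((i : Int) + 1) x y = true ↔
          (get3 dp ((i : Int) + 1) x y = true ∨ (x = t ∧ y = u))) := by
      intro x y hx hy
      rw [hd1, get3_set3 dp card.length S.toNat ((i : Int) + 1) t u ((i : Int) + 1) x y hshp
        hi1 hrow2 ht (by omega) hu (by omega) hi1 hx hy]
      constructor
      · rintro (hg | ⟨-, e2, e3⟩)
        · exact Or.inl hg
        · exact Or.inr ⟨e2, e3⟩
      · rintro (hg | ⟨e2, e3⟩)
        · exact Or.inl hg
        · exact Or.inr ⟨rfl, e2, e3⟩
    have h2c : ∀ x y : Int, 0 ≤ x → 0 ≤ y →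
        (get3 d2 ((i : Int) + 1) x y = true ↔
          (get3 d1 ((i : Int) + 1) x y = true ∨
            (t + (card.getD i (0, 0)).1 ≤ S ∧ x = t + (card.getD i (0, 0)).1 ∧ y = u))) := by
      intro x y hx hy
      rw [hd2]; split_ifs with hs
      · rw [get3_set3 d1 card.length S.toNat ((i : Int) + 1) (t + (card.getD i (0, 0)).1) u
          ((i : Int) + 1) x y hshp1 hi1 hrow2 (by omega) (by omega) hu (by omega) hi1 hx hy]
        constructor
        · rintro (hg | ⟨-, e2, e3⟩)
          · exact Or.inl hg
          · exact Or.inr ⟨hs, e2, e3⟩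
        · rintro (hg | ⟨-, e2, e3⟩)
          · exact Or.inl hg
          · exact Or.inr ⟨rfl, e2, e3⟩
      · constructor
        · exact Or.inl
        · rintro (hg | ⟨hcon, -, -⟩)
          · exact hg
          · exact absurd hcon hs
    have h3c : ∀ x y : Int, 0 ≤ x → 0 ≤ y →
        (get3 d3 ((i : Int) + 1) x y = true ↔
          (get3 d2 ((i : Int) + 1) x y = true ∨
            (u + (card.getD i (0, 0)).2 ≤ S ∧ x = t ∧ y = u + (card.getD i (0, 0)).2))) := by
      intro x y hx hy
      rw [hd3]; split_ifs with hs
      · rw [get3_set3 d2 card.length S.toNat ((i : Int) + 1) t (u + (card.getD i (0, 0)).2)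
          ((i : Int) + 1) x y hshp2 hi1 hrow2 ht (by omega) (by omega) (by omega) hi1 hx hy]
        constructor
        · rintro (hg | ⟨-, e2, e3⟩)
          · exact Or.inl hg
          · exact Or.inr ⟨hs, e2, e3⟩
        · rintro (hg | ⟨-, e2, e3⟩)
          · exact Or.inl hg
          · exact Or.inr ⟨rfl, e2, e3⟩
      · constructor
        · exact Or.inl
        · rintro (hg | ⟨hcon, -, -⟩)
          · exact hg
          · exact absurd hcon hs
    refine ⟨hshp3, ?_, ?_⟩
    · intro r x y h0 h1' h2' hner
      rw [hne3 r x y h0 h1' h2' hner]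
      exact hrows r x y h0 h1' h2' hner
    · intro x y hx hy
      rw [h3c x y hx hy, h2c x y hx hy, h1c x y hx hy, hrow x y hx hy]
      unfold Val Done
      constructor
      · rintro ((((⟨hd, hg⟩ | ⟨h1, h2, hd, hg⟩ | ⟨h1, h2, hd, hg⟩) | ⟨rfl, rfl⟩) |
          ⟨hle, rfl, rfl⟩) | ⟨hle, rfl, rfl⟩)
        · exact Or.inl ⟨by omega, hg⟩
        · exact Or.inr (Or.inl ⟨h1, h2, by omega, hg⟩)
        · exact Or.inr (Or.inr ⟨h1, h2, by omega, hg⟩)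
        · exact Or.inl ⟨by omega, hcur⟩
        · refine Or.inr (Or.inl ⟨by omega, by omega, by omega, ?_⟩)
          rw [show t + (card.getD i (0, 0)).1 - (card.getD i (0, 0)).1 = t from by ring]
          exact hcur
        · refine Or.inr (Or.inr ⟨by omega, by omega, by omega, ?_⟩)
          rw [show u + (card.getD i (0, 0)).2 - (card.getD i (0, 0)).2 = u from by ring]
          exact hcur
      · rintro (⟨hd, hg⟩ | ⟨h1, h2, hd, hg⟩ | ⟨h1, h2, hd, hg⟩)
        · by_cases hxy : x = t ∧ y = u
          · exact Or.inl (Or.inl (Or.inr hxy))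
          · exact Or.inl (Or.inl (Or.inl (Or.inl ⟨by omega, hg⟩)))
        · by_cases hxy : x - (card.getD i (0, 0)).1 = t ∧ y = u
          · exact Or.inl (Or.inr ⟨by omega, by omega, hxy.2⟩)
          · exact Or.inl (Or.inl (Or.inl (Or.inr (Or.inl ⟨h1, h2, by omega, hg⟩))))
        · by_cases hxy : x = t ∧ y - (card.getD i (0, 0)).2 = u
          · exact Or.inr ⟨by omega, hxy.1, by omega⟩
          · exact Or.inl (Or.inl (Or.inl (Or.inr (Or.inr ⟨h1, h2, by omega, hg⟩))))

lemma loopK (card : List (Int × Int)) (S : Int) (dpB dp : List (List (List Bool))) (i : Nat)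
    (t : Int) (hpre : Pre_solve card S) (hi : i < card.length) (ht : 0 ≤ t) (ht2 : t ≤ S)
    (h : InvD card S dpB i t 0 dp) :
    InvD card S dpB i t (S + 1) (innerK card S (i : Int) t dp) := by
  have hS0 : 0 ≤ S := hpre.1
  have key : ∀ (u : Nat), (u : Int) ≤ S + 1 →
      InvD card S dpB i t (u : Int)
        ((PySem.List.pyRange 0 (u : Int) 1).foldl (bodyK card S (i : Int) t) dp) := by
    intro u
    induction u with
    | zero =>
      intro _
      simp only [Nat.cast_zero]
      rw [PySem.List.pyRange_one_eq_nil (le_refl 0)]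
      simpa using h
    | succ u ih =>
      intro hu
      have hcast : ((u + 1 : Nat) : Int) = (u : Int) + 1 := by push_cast; ring
      rw [hcast, PySem.List.pyRange_one_succ_right (by omega), List.foldl_append,
        List.foldl_cons, List.foldl_nil]
      exact stepK card S dpB _ i t (u : Int) hpre hi ht ht2 (by omega) (by omega)
        (ih (by omega))
  have h2 := key (S.toNat + 1) (by omega)
  have hcast2 : ((S.toNat + 1 : Nat) : Int) = S + 1 := by omega
  rw [hcast2] at h2
  unfold innerK
  exact h2

lemma val_boundary (card : List (Int × Int)) (S : Int) (dpB : List (List (List Bool))) (i : Nat)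
    (t x y : Int) (hB : Shp dpB card.length S.toNat) (hS : 0 ≤ S) (hx : 0 ≤ x) (hy : 0 ≤ y) :
    Val card S dpB i t (S + 1) x y ↔ Val card S dpB i (t + 1) 0 x y := by
  have hoob : ∀ x' y' : Int, 0 ≤ x' → 0 ≤ y' → get3 dpB (i : Int) x' y' = true →
      x' ≤ S ∧ y' ≤ S := by
    intro x' y' hx' hy' hg
    constructor <;> by_contra hgt
    · rw [get3_oob dpB card.length S.toNat (i : Int) x' y' hB (by omega) hx' hy'
        (by omega)] at hg
      simp at hg
    · rw [get3_oob dpB card.length S.toNat (i : Int) x' y' hB (by omega) hx' hy'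
        (by omega)] at hg
      simp at hg
  unfold Val Done
  constructor
  · rintro (⟨hd, hg⟩ | ⟨h1, h2, hd, hg⟩ | ⟨h1, h2, hd, hg⟩)
    · have := hoob x y hx hy hg
      exact Or.inl ⟨by omega, hg⟩
    · have := hoob _ y (by omega) hy hg
      exact Or.inr (Or.inl ⟨h1, h2, by omega, hg⟩)
    · have := hoob x _ hx (by omega) hg
      exact Or.inr (Or.inr ⟨h1, h2, by omega, hg⟩)
  · rintro (⟨hd, hg⟩ | ⟨h1, h2, hd, hg⟩ | ⟨h1, h2, hd, hg⟩)
    · have := hoob x y hx hy hg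
      exact Or.inl ⟨by omega, hg⟩
    · have := hoob _ y (by omega) hy hg
      exact Or.inr (Or.inl ⟨h1, h2, by omega, hg⟩)
    · have := hoob x _ hx (by omega) hg
      exact Or.inr (Or.inr ⟨h1, h2, by omega, hg⟩)

lemma loopJ (card : List (Int × Int)) (S : Int) (dpB dp : List (List (List Bool))) (i : Nat)
    (hpre : Pre_solve card S) (hi : i < card.length) (hB : Shp dpB card.length S.toNat)
    (h : InvD card S dpB i 0 0 dp) :
    InvD card S dpB i (S + 1) 0 (innerJ card S (i : Int) dp) := by
  have hS0 : 0 ≤ S := hpre.1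
  have key : ∀ (t : Nat), (t : Int) ≤ S + 1 →
      InvD card S dpB i (t : Int) 0
        ((PySem.List.pyRange 0 (t : Int) 1).foldl
          (fun dp j => innerK card S (i : Int) j dp) dp) := by
    intro t
    induction t with
    | zero =>
      intro _
      simp only [Nat.cast_zero]
      rw [PySem.List.pyRange_one_eq_nil (le_refl 0)]
      simpa using h
    | succ t ih =>
      intro hu
      have hcast : ((t + 1 : Nat) : Int) = (t : Int) + 1 := by push_cast; ring
      rw [hcast, PySem.List.pyRange_one_succ_right (by omega), List.foldl_append,
        List.foldl_cons, List.foldl_nil]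
      have h1 := loopK card S dpB _ i (t : Int) hpre hi (by omega) (by omega) (ih (by omega))
      obtain ⟨a1, a2, a3⟩ := h1
      exact ⟨a1, a2, fun x y hx hy =>
        (a3 x y hx hy).trans (val_boundary card S dpB i (t : Int) x y hB hpre.1 hx hy)⟩
  have h2 := key (S.toNat + 1) (by omega)
  have hcast2 : ((S.toNat + 1 : Nat) : Int) = S + 1 := by omega
  rw [hcast2] at h2
  unfold innerJ
  exact h2

-- ---- the outer loop (A side) ----

def OInv (card : List (Int × Int)) (S : Int) (m : Nat) (dp : List (List (List Bool))) : Prop :=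
  Shp dp card.length S.toNat ∧
  (∀ r : Nat, r ≤ m → ∀ x y : Int, 0 ≤ x → 0 ≤ y →
    (get3 dp (r : Int) x y = true ↔ mdl card S r x y)) ∧
  (∀ r : Nat, m < r → ∀ x y : Int, 0 ≤ x → 0 ≤ y → get3 dp (r : Int) x y = false)

lemma oinv_start (card : List (Int × Int)) (S : Int) (hpre : Pre_solve card S) :
    OInv card S 0 (set3 (dpInit card S) 0 0 0) := by
  have hS0 : 0 ≤ S := hpre.1
  have hshp0 := shp_dpInit card S hpre.1
  refine ⟨shp_set3 (dpInit card S) card.length S.toNat 0 0 0 le_rfl le_rfl le_rfl hshp0,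
    ?_, ?_⟩
  · intro r hr x y hx hy
    have hr0 : r = 0 := by omega
    subst hr0
    simp only [Nat.cast_zero]
    rw [get3_set3 (dpInit card S) card.length S.toNat 0 0 0 0 x y hshp0 le_rfl (by omega)
      le_rfl (by omega) le_rfl (by omega) le_rfl hx hy]
    rw [get3_dpInit card S 0 x y]
    simp only [mdl]
    constructor
    · rintro (hfa | ⟨-, hx0, hy0⟩)
      · exact absurd hfa Bool.false_ne_true
      · exact ⟨hx0, hy0⟩
    · rintro ⟨hx0, hy0⟩
      exact Or.inr ⟨by trivial, hx0, hy0⟩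
  · intro r hr x y hx hy
    rw [get3_set3_ne (dpInit card S) 0 0 0 (r : Int) x y le_rfl le_rfl le_rfl (by omega) hx hy
      (by rintro ⟨h1, -, -⟩; omega)]
    exact get3_dpInit card S _ x y

lemma oinv_step (card : List (Int × Int)) (S : Int) (dp : List (List (List Bool))) (m : Nat)
    (hpre : Pre_solve card S) (hm : m < card.length) (h : OInv card S m dp) :
    OInv card S (m + 1) (innerJ card S (m : Int) dp) := by
  have hS0 : 0 ≤ S := hpre.1
  obtain ⟨hshp, hle, hgt⟩ := h
  obtain ⟨hca, hcb⟩ := card_getD_nonneg card S hpre m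
  have hcastm : ((m + 1 : Nat) : Int) = (m : Int) + 1 := by push_cast; ring
  have hstart : InvD card S dp m 0 0 dp := by
    refine ⟨hshp, fun r x y _ _ _ _ => rfl, ?_⟩
    intro x y hx hy
    have hz := hgt (m + 1) (by omega) x y hx hy
    rw [hcastm] at hz
    rw [hz]
    unfold Val Done
    constructor
    · intro hfa; exact absurd hfa Bool.false_ne_true
    · rintro (⟨hd, -⟩ | ⟨h1, -, hd, -⟩ | ⟨h1, -, hd, -⟩) <;> omega
  have hres := loopJ card S dp dp m hpre hm hshp hstart
  obtain ⟨hshp', hrows', hrow'⟩ := hres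
  have hoob : ∀ x' y' : Int, 0 ≤ x' → 0 ≤ y' → get3 dp (m : Int) x' y' = true →
      x' ≤ S ∧ y' ≤ S := by
    intro x' y' hx' hy' hg
    constructor <;> by_contra hgtc
    · rw [get3_oob dp card.length S.toNat (m : Int) x' y' hshp (by omega) hx' hy'
        (by omega)] at hg
      simp at hg
    · rw [get3_oob dp card.length S.toNat (m : Int) x' y' hshp (by omega) hx' hy'
        (by omega)] at hg
      simp at hg
  refine ⟨hshp', ?_, ?_⟩
  · intro r hr x y hx hy
    by_cases hrm : r ≤ m
    · rw [hrows' (r : Int) x y (by omega) hx hy (by omega)]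
      exact hle r hrm x y hx hy
    · have hr1 : r = m + 1 := by omega
      subst hr1
      rw [hcastm, hrow' x y hx hy]
      have hcur : ∀ x' y' : Int, 0 ≤ x' → 0 ≤ y' →
          (get3 dp (m : Int) x' y' = true ↔ mdl card S m x' y') :=
        fun x' y' a b => hle m (le_refl m) x' y' a b
      unfold Val Done
      simp only [mdl]
      constructor
      · rintro (⟨hd, hg⟩ | ⟨h1, h2, hd, hg⟩ | ⟨h1, h2, hd, hg⟩)
        · exact Or.inl ((hcur x y hx hy).mp hg)
        · exact Or.inr (Or.inl ⟨h1, h2, (hcur _ _ (by omega) hy).mp hg⟩)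
        · exact Or.inr (Or.inr ⟨h1, h2, (hcur _ _ hx (by omega)).mp hg⟩)
      · rintro (hm1 | ⟨h1, h2, hm1⟩ | ⟨h1, h2, hm1⟩)
        · have hg := (hcur x y hx hy).mpr hm1
          have := hoob x y hx hy hg
          exact Or.inl ⟨by omega, hg⟩
        · have hg := (hcur _ _ (by omega) hy).mpr hm1
          have := hoob _ y (by omega) hy hg
          exact Or.inr (Or.inl ⟨h1, h2, by omega, hg⟩)
        · have hg := (hcur _ _ hx (by omega)).mpr hm1
          have := hoob x _ hx (by omega) hg
          exact Or.inr (Or.inr ⟨h1, h2, by omega, hg⟩)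
  · intro r hr x y hx hy
    rw [hrows' (r : Int) x y (by omega) hx hy (by omega)]
    exact hgt r (by omega) x y hx hy

lemma dpAll_spec (card : List (Int × Int)) (S : Int) (hpre : Pre_solve card S) :
    OInv card S card.length (dpAll card S) := by
  have key : ∀ (m : Nat), m ≤ card.length →
      OInv card S m ((PySem.List.pyRange 0 (m : Int) 1).foldl (fun dp i => innerJ card S i dp)
        (set3 (dpInit card S) 0 0 0)) := by
    intro m
    induction m with
    | zero =>
      intro _
      simp only [Nat.cast_zero]
      rw [PySem.List.pyRange_one_eq_nil (le_refl 0)]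
      simpa using oinv_start card S hpre
    | succ m ih =>
      intro hm
      have hcast : ((m + 1 : Nat) : Int) = (m : Int) + 1 := by push_cast; ring
      rw [hcast, PySem.List.pyRange_one_succ_right (by omega), List.foldl_append,
        List.foldl_cons, List.foldl_nil]
      exact oinv_step card S _ m hpre (by omega) (ih (by omega))
  unfold dpAll
  exact key card.length (le_refl _)

-- ---- B's bitset rows ----

/-- bit characterization of one layer of B -/
def RowsOK (card : List (Int × Int)) (S : Int) (i : Nat) (rows : List Nat) : Prop :=
  rows.length = S.toNat + 1 ∧
  ∀ (j k : Nat), j < S.toNat + 1 →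
    ((rows.getD j 0).testBit k = true ↔ mdl card S i (j : Int) (k : Int))

lemma testBit_one' (i : Nat) : (1 : Nat).testBit i = decide (i = 0) := by
  have h := @Nat.testBit_two_pow 0 i
  simp at h
  simp [h, eq_comm]

lemma rowsOK_init (card : List (Int × Int)) (S : Int) (_hS : 0 ≤ S) :
    RowsOK card S 0 (bInit S) := by
  constructor
  · simp [bInit]
  · intro j k hj
    have hget : (bInit S).getD j 0 = if j = 0 then 1 else 0 := by
      cases j with
      | zero => rfl
      | succ m =>
        rw [if_neg (by omega)]
        show (List.replicate S.toNat 0).getD m 0 = 0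
        rw [List.getD_eq_getElem?_getD, List.getElem?_replicate]
        split <;> rfl
    rw [hget]
    simp only [mdl]
    by_cases hj0 : j = 0
    · subst hj0
      rw [if_pos rfl, testBit_one']
      constructor
      · intro hd
        have hk0 : k = 0 := of_decide_eq_true hd
        subst hk0
        exact ⟨by norm_num, by norm_num⟩
      · rintro ⟨-, hk⟩
        exact decide_eq_true (by exact_mod_cast hk)
    · rw [if_neg hj0, Nat.zero_testBit]
      constructor
      · intro hfa; exact absurd hfa Bool.false_ne_true
      · rintro ⟨hj0', -⟩
        exact absurd (by exact_mod_cast hj0' : j = 0) hj0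

lemma bFull_eq (S : Int) (hS : 0 ≤ S) : bFull S = 2 ^ (S.toNat + 1) - 1 := by
  unfold bFull
  have h1 : (S + 1).toNat = S.toNat + 1 := by omega
  rw [Nat.one_shiftLeft, h1]

lemma length_bStep (S x y : Int) (rows : List Nat) : (bStep S x y rows).length = rows.length := by
  rw [bStep, List.length_map, PySem.List.length_enumerate]

lemma getD_bStep (S x y : Int) (rows : List Nat) (j : Nat) (hj : j < rows.length) :
    (bStep S x y rows).getD j 0 =
      (rows.getD j 0 ||| ((rows.getD j 0 <<< y.toNat) &&& bFull S)) |||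
        (if x ≤ (j : Int) then (PySem.List.pyGet? rows ((j : Int) - x)).getD 0 else 0) := by
  rw [bStep, PySem.List.enumerate_eq_map_pyRange rows (0 : Nat), List.map_map]
  rw [← PySem.List.pyGetD_natCast]
  rw [show PySem.List.len rows = (rows.length : Int) from PySem.List.len_eq rows]
  rw [PySem.List.pyGetD_map_pyRange _ rows.length j 0 hj]
  simp [PySem.List.pyGetD_natCast]

lemma rowsOK_step (card : List (Int × Int)) (S : Int) (hpre : Pre_solve card S) (i : Nat)
    (rows : List Nat) (h : RowsOK card S i rows) :
    RowsOK card S (i + 1) (bStep S (card.getD i (0, 0)).1 (card.getD i (0, 0)).2 rows) := by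
  obtain ⟨hlen, hbit⟩ := h
  obtain ⟨hx0, hy0⟩ := card_getD_nonneg card S hpre i
  have hS0 : 0 ≤ S := hpre.1
  set x := (card.getD i (0, 0)).1 with hxdef
  set y := (card.getD i (0, 0)).2 with hydef
  refine ⟨by rw [length_bStep, hlen], ?_⟩
  intro j k hj
  rw [getD_bStep S x y rows j (by omega)]
  rw [Nat.testBit_or, Nat.testBit_or, Nat.testBit_and, Nat.testBit_shiftLeft,
    bFull_eq S hS0, Nat.testBit_two_pow_sub_one]
  have hTterm : ((if x ≤ (j : Int) then (PySem.List.pyGet? rows ((j : Int) - x)).getD 0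
      else 0).testBit k = true) ↔ (x ≤ (j : Int) ∧ mdl card S i ((j : Int) - x) (k : Int)) := by
    by_cases hxj : x ≤ (j : Int)
    · rw [if_pos hxj]
      have hnn : (0 : Int) ≤ (j : Int) - x := by omega
      rw [PySem.List.pyGet?_of_nonneg rows hnn]
      have hjx : ((j : Int) - x).toNat < S.toNat + 1 := by omega
      have hcast : (((( j : Int) - x).toNat : Int)) = (j : Int) - x := by omega
      rw [show (rows[((j : Int) - x).toNat]?).getD 0 = rows.getD ((j : Int) - x).toNat 0 from
        List.getD_eq_getElem?_getD.symm]
      rw [hbit _ k hjx, hcast]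
      exact ⟨fun hm => ⟨hxj, hm⟩, fun hm => hm.2⟩
    · rw [if_neg hxj, Nat.zero_testBit]
      constructor
      · intro hfa; exact absurd hfa Bool.false_ne_true
      · rintro ⟨hc, -⟩; exact absurd hc hxj
  show _ ↔ mdl card S (i + 1) (j : Int) (k : Int)
  simp only [mdl, ← hxdef, ← hydef]
  rw [Bool.or_eq_true, Bool.or_eq_true, Bool.and_eq_true, Bool.and_eq_true,
    decide_eq_true_eq, decide_eq_true_eq]
  constructor
  · rintro ((hH | ⟨⟨hyk, hB⟩, hkS⟩) | hT)
    · exact Or.inl ((hbit j k hj).mp hH)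
    · refine Or.inr (Or.inr ⟨by omega, by omega, ?_⟩)
      have hkk : (((k - y.toNat : Nat)) : Int) = (k : Int) - y := by omega
      have := (hbit j (k - y.toNat) hj).mp hB
      rw [hkk] at this
      exact this
    · obtain ⟨hxj, hm⟩ := hTterm.mp hT
      exact Or.inr (Or.inl ⟨hxj, by omega, hm⟩)
  · rintro (hH | ⟨h1, h2, h3⟩ | ⟨h1, h2, h3⟩)
    · exact Or.inl (Or.inl ((hbit j k hj).mpr hH))
    · exact Or.inr (hTterm.mpr ⟨h1, h3⟩)
    · refine Or.inl (Or.inr ⟨⟨by omega, ?_⟩, by omega⟩)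
      have hkk : (((k - y.toNat : Nat)) : Int) = (k : Int) - y := by omega
      rw [hbit j (k - y.toNat) hj, hkk]
      exact h3

lemma bAll_spec (card : List (Int × Int)) (S : Int) (hpre : Pre_solve card S) :
    (bAll card S).1.length = card.length + 1 ∧
    (∀ r : Nat, r ≤ card.length → RowsOK card S r ((bAll card S).1.getD r [])) ∧
    RowsOK card S card.length (bAll card S).2 := by
  have key : ∀ (cs : List (Int × Int)) (m : Nat) (st : List (List Nat) × List Nat),
      m ≤ card.length → card.drop m = cs → st.1.length = m + 1 →
      (∀ r : Nat, r ≤ m → RowsOK card S r (st.1.getD r [])) →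
      RowsOK card S m st.2 →
      ((cs.foldl (fun st c => let nw := bStep S c.1 c.2 st.2; (st.1 ++ [nw], nw)) st).1.length
          = card.length + 1 ∧
        (∀ r : Nat, r ≤ card.length → RowsOK card S r
          ((cs.foldl (fun st c => let nw := bStep S c.1 c.2 st.2;
            (st.1 ++ [nw], nw)) st).1.getD r [])) ∧
        RowsOK card S card.length
          (cs.foldl (fun st c => let nw := bStep S c.1 c.2 st.2; (st.1 ++ [nw], nw)) st).2) := by
    intro cs
    induction cs with
    | nil =>
      intro m st hmle hdrop hlen hreads hcur
      have hml : card.length ≤ m := by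
        have hd2 := congrArg List.length hdrop
        rw [List.length_drop] at hd2
        simp at hd2
        omega
      have hme : m = card.length := by omega
      subst hme
      exact ⟨hlen, hreads, hcur⟩
    | cons c cs ih =>
      intro m st hmle hdrop hlen hreads hcur
      have hm2 : m < card.length := by
        have hd2 := congrArg List.length hdrop
        rw [List.length_drop] at hd2
        simp at hd2
        omega
      have hsplit := List.drop_eq_getElem_cons (l := card) hm2
      rw [hdrop] at hsplit
      injection hsplit with hch hct
      have hc : card.getD m (0, 0) = c := by
        rw [List.getD_eq_getElem card (0, 0) hm2]; exact hch.symm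
      have hnw : RowsOK card S (m + 1) (bStep S c.1 c.2 st.2) := by
        rw [← hc]
        exact rowsOK_step card S hpre m st.2 hcur
      simp only [List.foldl_cons]
      refine ih (m + 1) (st.1 ++ [bStep S c.1 c.2 st.2], bStep S c.1 c.2 st.2) (by omega)
        hct.symm (by simp [hlen]) ?_ hnw
      intro r hr
      by_cases hrm : r ≤ m
      · rw [List.getD_append _ _ _ r (by omega)]
        exact hreads r hrm
      · have hre : r = m + 1 := by omega
        subst hre
        rw [List.getD_append_right _ _ _ _ (by omega), hlen]
        rw [show m + 1 - (m + 1) = 0 from by omega]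
        exact hnw
  have hstart1 : ∀ r : Nat, r ≤ 0 → RowsOK card S r (([bInit S] : List (List Nat)).getD r []) := by
    intro r hr
    have hr0 : r = 0 := by omega
    subst hr0
    exact rowsOK_init card S hpre.1
  have hres := key card 0 ([bInit S], bInit S) (by omega) (by simp) (by simp) hstart1
    (rowsOK_init card S hpre.1)
  unfold bAll
  exact hres

/-- bit lookup of a characterized layer, at Int coordinates -/
lemma rowbit (card : List (Int × Int)) (S : Int) (hpre : Pre_solve card S) (i : Nat)
    (rows : List Nat) (h : RowsOK card S i rows) (j k : Int) (hj : 0 ≤ j) (hk : 0 ≤ k) :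
    (bTest ((PySem.List.pyGet? rows j).getD 0) k = true ↔ mdl card S i j k) := by
  obtain ⟨hlen, hbit⟩ := h
  have hbt : ∀ r : Nat, bTest r k = r.testBit k.toNat := by
    intro r
    simp [bTest, Nat.testBit, Nat.and_comm]
  rw [PySem.List.pyGet?_of_nonneg rows hj]
  by_cases hjS : j.toNat < S.toNat + 1
  · rw [show (rows[j.toNat]?).getD 0 = rows.getD j.toNat 0 from
      List.getD_eq_getElem?_getD.symm]
    rw [hbt, hbit j.toNat k.toNat hjS]
    rw [show ((j.toNat : Nat) : Int) = j from by omega,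
      show ((k.toNat : Nat) : Int) = k from by omega]
  · have hnone : rows[j.toNat]? = none := by
      rw [List.getElem?_eq_none_iff]
      omega
    rw [hnone]
    show (bTest 0 k = true ↔ _)
    rw [hbt, Nat.zero_testBit]
    constructor
    · intro hfa; exact absurd hfa Bool.false_ne_true
    · intro hm
      have := mdl_range card S hpre i j k hm
      omega

-- ---- reconstruction ----

lemma rec_eq (card : List (Int × Int)) (S : Int) (hpre : Pre_solve card S) :
    ∀ (i : Nat), i ≤ card.length → ∀ (j k : Int) (ans : List String), mdl card S i j k →
      recA card (dpAll card S) i j k ans = recB card (bAll card S).1 i j k ans := by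
  have OA := dpAll_spec card S hpre
  have OB := bAll_spec card S hpre
  have hcardi : ∀ i : Nat, (PySem.List.pyGet? card (i : Int)).getD (0, 0)
      = card.getD i (0, 0) := by
    intro i; rw [PySem.List.pyGet?_natCast, ← List.getD_eq_getElem?_getD]
  have hLi : ∀ i : Nat, (PySem.List.pyGet? (bAll card S).1 (i : Int)).getD []
      = (bAll card S).1.getD i [] := by
    intro i; rw [PySem.List.pyGet?_natCast, ← List.getD_eq_getElem?_getD]
  intro i
  induction i with
  | zero => intro _ j k ans _; simp [recA, recB]
  | succ i ih =>
    intro hi j k ans hm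
    have hrange := mdl_range card S hpre (i + 1) j k hm
    obtain ⟨hca, hcb⟩ := card_getD_nonneg card S hpre i
    simp only [recA, recB, hcardi i, hLi i]
    have hA := OA.2.1 i (by omega)
    have hB := rowbit card S hpre i ((bAll card S).1.getD i []) (OB.2.1 i (by omega))
    have hc1 : get3 (dpAll card S) (i : Int) j k
        = bTest ((PySem.List.pyGet? ((bAll card S).1.getD i []) j).getD 0) k := by
      rw [Bool.eq_iff_iff, hA j k (by omega) (by omega)]
      exact (hB j k (by omega) (by omega)).symm
    rw [hc1]
    by_cases hc1b : bTest ((PySem.List.pyGet? ((bAll card S).1.getD i []) j).getD 0) k = true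
    · rw [if_pos hc1b, if_pos hc1b]
      exact ih (by omega) j k (ans ++ ["H"]) ((hB j k (by omega) (by omega)).mp hc1b)
    · rw [if_neg hc1b, if_neg hc1b]
      have hc2 : (decide (0 ≤ j - (card.getD i (0, 0)).1)
            && get3 (dpAll card S) (i : Int) (j - (card.getD i (0, 0)).1) k)
          = (decide ((card.getD i (0, 0)).1 ≤ j)
            && bTest ((PySem.List.pyGet? ((bAll card S).1.getD i [])
              (j - (card.getD i (0, 0)).1)).getD 0) k) := by
        have hdec : decide (0 ≤ j - (card.getD i (0, 0)).1)
            = decide ((card.getD i (0, 0)).1 ≤ j) := by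
          rw [decide_eq_decide]; omega
        rw [hdec]
        by_cases hge : (card.getD i (0, 0)).1 ≤ j
        · simp only [hge, decide_true, Bool.true_and]
          rw [Bool.eq_iff_iff, hA _ k (by omega) (by omega)]
          exact (hB _ k (by omega) (by omega)).symm
        · rw [decide_eq_false hge, Bool.false_and, Bool.false_and]
      rw [hc2]
      by_cases hc2b : (decide ((card.getD i (0, 0)).1 ≤ j)
          && bTest ((PySem.List.pyGet? ((bAll card S).1.getD i [])
            (j - (card.getD i (0, 0)).1)).getD 0) k) = true
      · rw [if_pos hc2b, if_pos hc2b]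
        obtain ⟨hd1, hd2⟩ := Bool.and_eq_true _ _ |>.mp hc2b
        have hge : (card.getD i (0, 0)).1 ≤ j := of_decide_eq_true hd1
        exact ih (by omega) (j - (card.getD i (0, 0)).1) k (ans ++ ["T"])
          ((hB _ k (by omega) (by omega)).mp hd2)
      · rw [if_neg hc2b, if_neg hc2b]
        have hmF : mdl card S i j (k - (card.getD i (0, 0)).2) := by
          simp only [mdl] at hm
          rcases hm with h1 | ⟨e1, e2, e3⟩ | ⟨e1, e2, e3⟩
          · exact absurd ((hB j k (by omega) (by omega)).mpr h1) hc1b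
          · exact absurd ((Bool.and_eq_true _ _).mpr ⟨decide_eq_true (by omega),
              (hB _ k (by omega) (by omega)).mpr e3⟩) hc2b
          · exact e3
        exact ih (by omega) j (k - (card.getD i (0, 0)).2) (ans ++ ["F"]) hmF

-- ===== VERDICT (by name: the statement is the Claim_ definition above) =====
theorem solve_spec : Claim_equal_solve := by
  intro card S hdom hpre
  show solve card S = solve_alt card S
  have OA := dpAll_spec card S hpre
  have OB := bAll_spec card S hpre
  have hmS : (get3 (dpAll card S) (card.length : Int) S S = true ↔
      mdl card S card.length S S) :=
    OA.2.1 card.length (le_refl _) S S hpre.1 hpre.1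
  have hmB : (bTest ((PySem.List.pyGet? (bAll card S).2 S).getD 0) S = true ↔
      mdl card S card.length S S) :=
    rowbit card S hpre card.length (bAll card S).2 OB.2.2 S S hpre.1 hpre.1
  have hcond : get3 (dpAll card S) (card.length : Int) S S
      = bTest ((PySem.List.pyGet? (bAll card S).2 S).getD 0) S := by
    rw [Bool.eq_iff_iff, hmS, hmB]
  simp only [solve, solve_alt]
  rw [hcond]
  cases hmem : bTest ((PySem.List.pyGet? (bAll card S).2 S).getD 0) S with
  | false => simp
  | true =>
    simp only [Bool.not_true]
    rw [if_neg Bool.false_ne_true, if_neg Bool.false_ne_true]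
    rw [rec_eq card S hpre card.length (le_refl _) S S [] (hmB.mp hmem)]
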